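-- pv_equiv track=rewrite | github.com/ErnieWhite/AOC_Python | 2015/day01.py | part1
-- ===== SOURCE A (Python) =====
-- def part1(data):
--     """
--     Calculate the floor Santa ends up on.
--     '(' means go up one floor, ')' means go down one floor.
--
--     Args:
--         data: Input data as string
--
--     Returns:
--         Final floor number
--     """
--     floor = 0
--     for char in data.strip():
--         if char == '(':
--             floor += 1
--         elif char == ')':
--             floor -= 1
--     return floor
-- ===== SOURCE B (Python) =====
-- def part1(data):
--     s = data.strip()
--     return s.count('(') - s.count(')')
-- ===== Notes on version B (the rewrite author's own statement) =====
-- stated objective: idiomatic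
-- what changed: Replaces the per-character branching accumulator loop with two independent library counting passes over the stripped string (count of open parens minus count of close parens).
import Mathlib
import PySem

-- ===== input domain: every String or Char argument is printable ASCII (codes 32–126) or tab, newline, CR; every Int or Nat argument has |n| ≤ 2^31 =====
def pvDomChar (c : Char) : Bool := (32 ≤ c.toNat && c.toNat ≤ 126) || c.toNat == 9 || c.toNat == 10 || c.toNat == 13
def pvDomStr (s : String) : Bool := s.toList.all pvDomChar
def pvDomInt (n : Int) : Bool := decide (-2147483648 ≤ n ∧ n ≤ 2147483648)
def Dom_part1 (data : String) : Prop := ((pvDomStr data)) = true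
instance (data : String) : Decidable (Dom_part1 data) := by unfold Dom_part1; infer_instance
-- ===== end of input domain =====

-- B replaces A's branching per-character accumulator loop with two independent
-- library counting passes over the stripped string (idiomatic; same cost).

-- ===== PORT A =====
def part1 (data : String) : Int :=
  (PySem.Str.strip data).toList.foldl
    (fun floor char =>
      if char == '(' then floor + 1
      else if char == ')' then floor - 1
      else floor) 0

-- ===== PORT B =====
def part1_alt (data : String) : Int :=
  let s := PySem.Str.strip data
  (PySem.Str.count s "(" : Int) - (PySem.Str.count s ")" : Int)

-- ===== PRECONDITION & SPEC =====
def Spec_part1 (data : String) (out : Int) : Prop := out = part1_alt data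
instance (data : String) (out : Int) : Decidable (Spec_part1 data out) := by unfold Spec_part1; infer_instance

-- ===== CLAIM (what is proved, stated in full; the proofs are below) =====
def Claim_equal_part1 : Prop := ∀ (data : String), Dom_part1 data → Spec_part1 data (part1 data)

-- ===== LEMMAS AND PROOFS =====

-- Chars.count with a single-character needle is plain character counting.
theorem chars_count_go_singleton (c : Char) :
    ∀ (l : List Char) (fuel acc : Nat), l.length ≤ fuel →
      PySem.Chars.count.go [c] fuel l acc = acc + l.count c := by
  intro l
  induction l with
  | nil =>
      intro fuel acc _
      cases fuel <;> simp [PySem.Chars.count.go]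
  | cons h t ih =>
      intro fuel acc hle
      cases fuel with
      | zero => simp at hle
      | succ n =>
          have ht : t.length ≤ n := by simpa using hle
          by_cases hc : c = h
          · subst hc
            simp [PySem.Chars.count.go, List.isPrefixOf,
              ih n (acc + 1) ht]
            omega
          · simp [PySem.Chars.count.go, List.isPrefixOf, Ne.symm hc,
              ih n acc ht, hc]

theorem chars_count_singleton (l : List Char) (c : Char) :
    PySem.Chars.count l [c] = l.count c := by
  simp [PySem.Chars.count, chars_count_go_singleton c l l.length 0 le_rfl]

-- A's branching fold computes count '(' minus count ')'.
theorem foldl_floor (l : List Char) (acc : Int) :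
    l.foldl (fun floor char =>
      if char == '(' then floor + 1
      else if char == ')' then floor - 1
      else floor) acc = acc + (l.count '(' : Int) - (l.count ')' : Int) := by
  induction l generalizing acc with
  | nil => simp
  | cons h t ih =>
      rw [List.foldl_cons, ih]
      simp only [List.count_cons]
      split_ifs with h1 h2 <;> simp_all <;> omega

-- ===== VERDICT (by name: the statement is the Claim_ definition above) =====
theorem part1_spec : Claim_equal_part1 := by
  intro data _
  unfold Spec_part1 part1 part1_alt
  simp only [PySem.Str.count_eq]
  have h1 : ("(" : String).toList = ['('] := rfl
  have h2 : (")" : String).toList = [')'] := rfl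
  rw [h1, h2, chars_count_singleton, chars_count_singleton, foldl_floor]
  ring
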